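-- pv_equiv track=rewrite | github.com/poketony/XS1KOR | 0.xenosaga0/umn/uml_tool.py | apply_charmap
-- ===== SOURCE A (Python) =====
-- def apply_charmap(text: str, charmap: dict) -> str:
--     result = []
--     i = 0
--     while i < len(text):
--         matched = False
--         for key, val in charmap.items():
--             if text[i:i+len(key)] == key:
--                 result.append(val)
--                 i += len(key)
--                 matched = True
--                 break
--         if not matched:
--             result.append(text[i])
--             i += 1
--     return ''.join(result)
-- ===== SOURCE B (Python) =====
-- def apply_charmap(text: str, charmap: dict) -> str:
--     # Bucket the keys by their first character (insertion order preserved within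
--     # a bucket); at each position only the bucket of text[i] can match, so the
--     # scan over the whole charmap disappears.  Empty keys can never usefully
--     # match and are skipped.
--     index = {}
--     for key, val in charmap.items():
--         if key:
--             index.setdefault(key[0], []).append((key, val))
--     out = []
--     i = 0
--     n = len(text)
--     while i < n:
--         c = text[i]
--         for key, val in index.get(c, ()):
--             if text.startswith(key, i):
--                 out.append(val)
--                 i += len(key)
--                 break
--         else:
--             out.append(c)
--             i += 1
--     return ''.join(out)
-- ===== Notes on version B (the rewrite author's own statement) =====
-- stated objective: faster
-- what changed: B buckets the charmap keys by their first character once, so each text position scans only the bucket of text[i] (using str.startswith with an offset) instead of slicing and comparing against every key of the dict.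
-- outside the precondition, e.g. on apply_charmap('ab', {'': 'X'}): A does not finish within the time limit, B returns 'ab'; on apply_charmap('aa', {'a': 'x', '': 'y'}): A returns 'xx', B returns 'xx'
import Mathlib
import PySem

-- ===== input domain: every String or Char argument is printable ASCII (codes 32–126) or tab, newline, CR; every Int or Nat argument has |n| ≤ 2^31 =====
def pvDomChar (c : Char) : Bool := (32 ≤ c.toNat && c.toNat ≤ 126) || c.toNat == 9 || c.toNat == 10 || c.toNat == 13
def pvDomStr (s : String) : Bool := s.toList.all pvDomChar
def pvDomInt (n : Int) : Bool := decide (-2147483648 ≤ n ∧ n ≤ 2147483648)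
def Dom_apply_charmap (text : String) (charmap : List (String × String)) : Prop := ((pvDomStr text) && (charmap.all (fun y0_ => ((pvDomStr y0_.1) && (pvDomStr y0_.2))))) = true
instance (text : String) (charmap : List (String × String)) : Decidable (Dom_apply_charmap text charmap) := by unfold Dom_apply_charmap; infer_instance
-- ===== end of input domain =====

-- B buckets the keys by first character and probes only the bucket of the current
-- character at each position; equivalence about the RETURN value is proved on Pre_.

-- the dict argument: the List (String × String) is the pair sequence the Python dict
-- was built from; dict semantics keep the FIRST position and the LAST value of a key
-- (exact re-statement of Python dict construction; used identically by both ports)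
def pvSetItem : List (String × String) → String → String → List (String × String)
  | [], k, v => [(k, v)]
  | (k', v') :: rest, k, v =>
      if k' == k then (k', v) :: rest else (k', v') :: pvSetItem rest k v

def pvDictItems (charmap : List (String × String)) : List (String × String) :=
  charmap.foldl (fun d p => pvSetItem d p.1 p.2) []

-- ===== PORT A =====
-- first (key, val) of the charmap whose key equals the slice text[i:i+len(key)]
-- (slice-of-suffix = List.take, exact for nonnegative in-order slicing)
def pvFindA (charmap : List (String × String)) (suffix : List Char) : Option (String × String) :=
  match charmap with
  | [] => none
  | (k, v) :: rest =>
      if suffix.take k.toList.length == k.toList then some (k, v) else pvFindA rest suffix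

-- the while loop of A; fuel = remaining text length bounds the iterations
-- (each iteration consumes ≥ 1 character when every key is nonempty, see Pre_)
def pvLoopA (charmap : List (String × String)) : Nat → List Char → List Char
  | 0, _ => []
  | _ + 1, [] => []
  | fuel + 1, c :: rest =>
      match pvFindA charmap (c :: rest) with
      | some (k, v) => v.toList ++ pvLoopA charmap fuel ((c :: rest).drop k.toList.length)
      | none => c :: pvLoopA charmap fuel rest

def apply_charmap (text : String) (charmap : List (String × String)) : String :=
  String.ofList (pvLoopA (pvDictItems charmap) text.toList.length text.toList)

-- ===== PORT B =====
-- index.get(c, ()) on the bucket association list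
def pvBucketGet (idx : List (Char × List (List Char × String))) (c : Char) : List (List Char × String) :=
  match idx with
  | [] => []
  | (c', b) :: rest => if c' == c then b else pvBucketGet rest c

-- index.setdefault(c, []).append(kv)
def pvBucketAdd (idx : List (Char × List (List Char × String))) (c : Char)
    (kv : List Char × String) : List (Char × List (List Char × String)) :=
  match idx with
  | [] => [(c, [kv])]
  | (c', b) :: rest => if c' == c then (c', b ++ [kv]) :: rest else (c', b) :: pvBucketAdd rest c kv

-- the index-building for-loop of B (empty keys are skipped)
def pvBuildIdx (charmap : List (String × String)) : List (Char × List (List Char × String)) :=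
  charmap.foldl
    (fun idx kv =>
      match kv.1.toList with
      | [] => idx
      | c :: _ => pvBucketAdd idx c (kv.1.toList, kv.2)) []

-- first (key, val) of the bucket with text.startswith(key, i)
def pvFindB (bucket : List (List Char × String)) (suffix : List Char) : Option (List Char × String) :=
  match bucket with
  | [] => none
  | (k, v) :: rest => if k.isPrefixOf suffix then some (k, v) else pvFindB rest suffix

-- the while loop of B
def pvLoopB (idx : List (Char × List (List Char × String))) : Nat → List Char → List Char
  | 0, _ => []
  | _ + 1, [] => []
  | fuel + 1, c :: rest =>
      match pvFindB (pvBucketGet idx c) (c :: rest) with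
      | some (k, v) => v.toList ++ pvLoopB idx fuel ((c :: rest).drop k.length)
      | none => c :: pvLoopB idx fuel rest

def apply_charmap_alt (text : String) (charmap : List (String × String)) : String :=
  String.ofList (pvLoopB (pvBuildIdx (pvDictItems charmap)) text.toList.length text.toList)

-- ===== PRECONDITION & SPEC =====
-- Pre_ excludes charmaps with an empty key on nonempty text: the empty key matches at
-- every position, so A's while loop stops advancing and diverges as soon as the empty
-- key is the first match (on empty text the loop never runs, so those inputs stay in).
def Pre_apply_charmap (text : String) (charmap : List (String × String)) : Prop :=
  text = "" ∨ ∀ p ∈ charmap, p.1 ≠ ""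
instance (text : String) (charmap : List (String × String)) : Decidable (Pre_apply_charmap text charmap) := by
  unfold Pre_apply_charmap; infer_instance

def pvWitness_apply_charmap : String × (List (String × String)) := ("abcb", [("ab", "X"), ("b", "Y")])

def Spec_apply_charmap (text : String) (charmap : List (String × String)) (out : String) : Prop := out = apply_charmap_alt text charmap
instance (text : String) (charmap : List (String × String)) (out : String) : Decidable (Spec_apply_charmap text charmap out) := by unfold Spec_apply_charmap; infer_instance

-- ===== CLAIM (what is proved, stated in full; the proofs are below) =====
def Claim_equal_apply_charmap : Prop := ∀ (text : String) (charmap : List (String × String)), Dom_apply_charmap text charmap → Pre_apply_charmap text charmap → Spec_apply_charmap text charmap (apply_charmap text charmap)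

-- ===== LEMMAS AND PROOFS =====

-- the bucket of c after one setdefault/append step
theorem pvBucketGet_add (idx : List (Char × List (List Char × String))) (c c' : Char)
    (kv : List Char × String) :
    pvBucketGet (pvBucketAdd idx c' kv) c
      = pvBucketGet idx c ++ (if c' == c then [kv] else []) := by
  induction idx with
  | nil =>
      by_cases h : c' = c <;> simp [pvBucketAdd, pvBucketGet, h]
  | cons hd tl ih =>
      obtain ⟨d, b⟩ := hd
      by_cases hd' : d = c'
      · subst hd'
        by_cases hc : d = c <;> simp [pvBucketAdd, pvBucketGet, hc]
      · by_cases hc : d = c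
        · subst hc
          have hcc : ¬ c' = d := fun h => hd' h.symm
          simp [pvBucketAdd, pvBucketGet, hd', hcc]
        · simp [pvBucketAdd, pvBucketGet, hd', hc, ih]

-- the bucket of c after folding the whole charmap, relative to a starting index
theorem pvBucketGet_foldl (charmap : List (String × String))
    (idx : List (Char × List (List Char × String))) (c : Char) :
    pvBucketGet (charmap.foldl
      (fun idx kv =>
        match kv.1.toList with
        | [] => idx
        | d :: _ => pvBucketAdd idx d (kv.1.toList, kv.2)) idx) c
      = pvBucketGet idx c
        ++ (charmap.filter (fun kv => kv.1.toList.head? == some c)).map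
             (fun kv => (kv.1.toList, kv.2)) := by
  induction charmap generalizing idx with
  | nil => simp
  | cons hd tl ih =>
      obtain ⟨k, v⟩ := hd
      cases hk : k.toList with
      | nil => simp [List.foldl, hk, ih, List.filter]
      | cons d ks =>
          by_cases hdc : d = c
          · simp [List.foldl, hk, ih, pvBucketGet_add, hdc, List.filter]
          · have hdc2 : (d == c) = false := beq_eq_false_iff_ne.mpr hdc
            simp [List.foldl, hk, ih, pvBucketGet_add, hdc2, List.filter]

theorem pvBucketGet_build (charmap : List (String × String)) (c : Char) :
    pvBucketGet (pvBuildIdx charmap) c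
      = (charmap.filter (fun kv => kv.1.toList.head? == some c)).map
          (fun kv => (kv.1.toList, kv.2)) := by
  simpa [pvBuildIdx, pvBucketGet] using pvBucketGet_foldl charmap [] c

-- a list is a prefix exactly when taking its length gives it back
theorem pvTake_iff_prefix (ks rest : List Char) :
    List.take ks.length rest = ks ↔ ks <+: rest :=
  ⟨fun h => List.prefix_iff_eq_take.mpr h.symm, fun h => (List.prefix_iff_eq_take.mp h).symm⟩

-- the key list after a dict overwrite step: unchanged, or the new key appended
theorem pvSetItem_map_fst (d : List (String × String)) (k v : String) :
    (pvSetItem d k v).map Prod.fst = d.map Prod.fst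
      ∨ (pvSetItem d k v).map Prod.fst = d.map Prod.fst ++ [k] := by
  induction d with
  | nil => simp [pvSetItem]
  | cons hd tl ih =>
      obtain ⟨k', v'⟩ := hd
      by_cases h : k' = k
      · simp [pvSetItem, h]
      · rcases ih with h1 | h1 <;> simp [pvSetItem, h, h1]

-- keys of the built dict come from the keys of the pair sequence
theorem pvDictItems_keys (charmap : List (String × String))
    (d : List (String × String)) (x : String)
    (hx : x ∈ (charmap.foldl (fun d p => pvSetItem d p.1 p.2) d).map Prod.fst) :
    x ∈ d.map Prod.fst ∨ x ∈ charmap.map Prod.fst := by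
  induction charmap generalizing d with
  | nil => simpa using hx
  | cons hd tl ih =>
      simp only [List.foldl_cons] at hx
      rcases ih (pvSetItem d hd.1 hd.2) hx with h1 | h1
      · rcases pvSetItem_map_fst d hd.1 hd.2 with he | he
        · exact Or.inl (he ▸ h1)
        · rw [he, List.mem_append] at h1
          rcases h1 with h1 | h1
          · exact Or.inl h1
          · simp at h1
            exact Or.inr (by simp [h1])
      · exact Or.inr (by simp at h1 ⊢; tauto)

-- nonempty keys survive dict construction
theorem pvDictItems_ne (charmap : List (String × String))
    (hne : ∀ p ∈ charmap, p.1 ≠ "") :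
    ∀ p ∈ pvDictItems charmap, p.1 ≠ "" := by
  intro p hp
  have hx : p.1 ∈ (pvDictItems charmap).map Prod.fst := List.mem_map_of_mem hp
  rcases pvDictItems_keys charmap [] p.1 hx with h1 | h1
  · simp at h1
  · obtain ⟨q, hq, hq1⟩ := List.mem_map.mp h1
    exact hq1 ▸ hne q hq

-- A's first-match over the whole charmap equals B's first-match over the bucket of c
theorem pvFind_eq (charmap : List (String × String)) (c : Char) (rest : List Char)
    (hne : ∀ p ∈ charmap, p.1 ≠ "") :
    (pvFindA charmap (c :: rest)).map (fun p => (p.1.toList, p.2))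
      = pvFindB (pvBucketGet (pvBuildIdx charmap) c) (c :: rest) := by
  rw [pvBucketGet_build]
  induction charmap with
  | nil => simp [pvFindA, pvFindB]
  | cons hd tl ih =>
      obtain ⟨k, v⟩ := hd
      have hk0 : k ≠ "" := hne (k, v) (List.mem_cons_self ..)
      have htl : ∀ p ∈ tl, p.1 ≠ "" := fun p hp => hne p (List.mem_cons_of_mem _ hp)
      cases hk : k.toList with
      | nil =>
          exact absurd (by simpa using congrArg String.ofList hk) hk0
      | cons d ks =>
          by_cases hdc : d = c
          · by_cases hp : ks <+: rest
            · simp [pvFindA, pvFindB, List.filter, hk, hdc, hp,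
                    (pvTake_iff_prefix ks rest).mpr hp]
            · have ht : ¬ List.take ks.length rest = ks := fun h =>
                hp ((pvTake_iff_prefix ks rest).mp h)
              simp [pvFindA, pvFindB, List.filter, hk, hdc, hp, ht,
                    ih htl]
          · have hdc2 : (d == c) = false := beq_eq_false_iff_ne.mpr hdc
            have hca : ¬ (c = d ∧ List.take ks.length rest = ks) := fun h => hdc h.1.symm
            simp [pvFindA, List.filter, hk, hdc2, hca, ih htl]

-- the two while loops agree step by step for every fuel
theorem pvLoop_eq (charmap : List (String × String)) (hne : ∀ p ∈ charmap, p.1 ≠ "")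
    (fuel : Nat) (suffix : List Char) :
    pvLoopA charmap fuel suffix = pvLoopB (pvBuildIdx charmap) fuel suffix := by
  induction fuel generalizing suffix with
  | zero => simp [pvLoopA, pvLoopB]
  | succ n ih =>
      cases suffix with
      | nil => simp [pvLoopA, pvLoopB]
      | cons c rest =>
          have hfind := pvFind_eq charmap c rest hne
          cases hA : pvFindA charmap (c :: rest) with
          | none =>
              rw [hA] at hfind
              simp only [Option.map_none] at hfind
              simp [pvLoopA, pvLoopB, hA, ← hfind, ih]
          | some p =>
              obtain ⟨k, v⟩ := p
              rw [hA] at hfind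
              simp only [Option.map_some] at hfind
              simp [pvLoopA, pvLoopB, hA, ← hfind, ih]

-- ===== VERDICT (by name: the statement is the Claim_ definition above) =====
theorem apply_charmap_spec : Claim_equal_apply_charmap := by
  intro text charmap _ hpre
  unfold Spec_apply_charmap apply_charmap apply_charmap_alt
  rcases hpre with h | h
  · subst h; rfl
  · rw [pvLoop_eq (pvDictItems charmap) (pvDictItems_ne charmap h)]
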